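-- pv_equiv track=rewrite | github.com/jramaswami/Binary_Search_Python | ambigram_detection.py | solve
-- ===== SOURCE A (Python) =====
-- import string
--
-- class UnionFind:
--
--     def __init__(self):
--         self.id = {c: c for c in string.ascii_lowercase}
--         self.size = {c: 1 for c in string.ascii_lowercase}
--
--     def find(self, u):
--         if self.id[u] != u:
--             self.id[u] = self.find(self.id[u])
--         return self.id[u]
--
--     def union(self, a, b):
--         a = self.find(a)
--         b = self.find(b)
--         if a != b:
--             if self.size[a] < self.size[b]:
--                 a, b = b, a
--             self.id[b] = a
--             self.size[a] += self.size[b]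
--
-- def solve(S, pairs):
--     uf = UnionFind()
--     for a, b in pairs:
--         uf.union(a, b)
--
--     i = 0
--     j = len(S) - 1
--     while i <= j:
--         if uf.find(S[i]) != uf.find(S[j]):
--             return False
--         i += 1
--         j -= 1
--     return True
-- ===== SOURCE B (Python) =====
-- import string
--
-- def solve(S, pairs):
--     # Flat label map instead of a union-find forest: each letter carries its
--     # class label directly; a merge rewrites the (26-entry) label table.
--     label = {c: c for c in string.ascii_lowercase}
--     for a, b in pairs:
--         la = label[a]
--         lb = label[b]
--         if la != lb:
--             label = {c: (la if v == lb else v) for c, v in label.items()}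
--     return all(label[x] == label[y] for x, y in zip(S, reversed(S)))
-- ===== Notes on version B (the rewrite author's own statement) =====
-- stated objective: faster
-- what changed: Replaces the union-find forest (path compression, union by size, a recursive find per lookup) by a flat letter-to-label table that is rewritten on each of the at most 25 effective merges, so every later lookup is a single dict access instead of a recursive find.
-- outside the precondition, e.g. on solve('b?a', []): A returns False, B returns False
import Mathlib
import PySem

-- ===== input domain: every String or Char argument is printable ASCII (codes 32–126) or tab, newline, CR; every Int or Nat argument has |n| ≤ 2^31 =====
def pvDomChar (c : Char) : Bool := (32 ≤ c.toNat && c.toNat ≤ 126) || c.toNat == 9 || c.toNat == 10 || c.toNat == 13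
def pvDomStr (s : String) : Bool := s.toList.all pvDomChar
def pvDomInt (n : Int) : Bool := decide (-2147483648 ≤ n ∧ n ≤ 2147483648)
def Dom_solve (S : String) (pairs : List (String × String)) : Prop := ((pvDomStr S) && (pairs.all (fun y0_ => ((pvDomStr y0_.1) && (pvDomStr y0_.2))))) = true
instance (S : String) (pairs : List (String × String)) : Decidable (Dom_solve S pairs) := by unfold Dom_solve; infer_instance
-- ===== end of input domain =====

-- B replaces A's union-find forest by a flat letter→label table rewritten on each effective
-- merge (at most 25 possible), so every later lookup is one dict access instead of a find.


-- string.ascii_lowercase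
def pvLetters : List Char :=
  ['a','b','c','d','e','f','g','h','i','j','k','l','m','n','o','p','q','r','s','t','u','v','w','x','y','z']

-- {c: v for c in string.ascii_lowercase}: both Pythons build this identity/size table
def pvInit (v : Char → Char) : PySem.Dict Char Char :=
  pvLetters.foldl (fun d c => d.insert c (v c)) PySem.Dict.empty

-- the dicts are keyed by single-character strings; under Pre_ every key used is one
-- lowercase char, so lookups are modelled by that char (headD is a totality guard only)
def pvChr (s : String) : Char := s.toList.headD 'a'

-- ===== PORT A =====
-- UnionFind.find with path compression; fuel is a totality guard only (under Pre_ the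
-- parent chain is acyclic over 26 letters, so depth < 27 and fuel is never exhausted);
-- getD's default is a KeyError guard only (under Pre_ every key looked up is present)
def ufFind : Nat → PySem.Dict Char Char → Char → Char × PySem.Dict Char Char
  | 0, d, u => (u, d)
  | fuel+1, d, u =>
    let p := d.getD u u
    if p = u then (u, d)
    else
      let r := ufFind fuel d p
      (r.1, r.2.insert u r.1)

-- UnionFind.union (state = (id, size))
def ufUnion (st : PySem.Dict Char Char × PySem.Dict Char Int) (a b : Char) :
    PySem.Dict Char Char × PySem.Dict Char Int :=
  let fa := ufFind 27 st.1 a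
  let fb := ufFind 27 fa.2 b
  if fa.1 ≠ fb.1 then
    let sa := st.2.getD fa.1 1
    let sb := st.2.getD fb.1 1
    let xy := if sa < sb then (fb.1, fa.1) else (fa.1, fb.1)
    (fb.2.insert xy.2 xy.1, st.2.insert xy.1 (st.2.getD xy.1 1 + st.2.getD xy.2 1))
  else (fb.2, st.2)

-- the while loop: i, j two pointers; find mutates id, so it is threaded through
def ufCheck : Nat → PySem.Dict Char Char → List Char → Int → Int → Bool
  | 0, _, _, _, _ => true   -- fuel guard only: the loop runs at most len(S) times
  | fuel+1, d, cs, i, j =>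
    if i ≤ j then
      let ci := PySem.List.pyGetD cs i 'a'   -- S[i]; in range while 0 ≤ i ≤ j < len
      let cj := PySem.List.pyGetD cs j 'a'
      let fi := ufFind 27 d ci
      let fj := ufFind 27 fi.2 cj
      if fi.1 ≠ fj.1 then false
      else ufCheck fuel fj.2 cs (i+1) (j-1)
    else true

def solve (S : String) (pairs : List (String × String)) : Bool :=
  let st := pairs.foldl (fun st p => ufUnion st (pvChr p.1) (pvChr p.2))
      (pvInit (fun c => c), pvLetters.foldl (fun d c => d.insert c 1) PySem.Dict.empty)
  ufCheck (S.toList.length + 1) st.1 S.toList 0 ((S.toList.length : Int) - 1)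

-- ===== PORT B =====
-- one merge step: la/lb lookups, then rebuild the whole table via the dict comprehension
def lbStep (lab : PySem.Dict Char Char) (a b : Char) : PySem.Dict Char Char :=
  let la := lab.getD a a   -- label[a]; getD default is a KeyError guard only
  let lb := lab.getD b b
  if la ≠ lb then
    PySem.Dict.mk (lab.items.map (fun kv => (kv.1, if kv.2 = lb then la else kv.2)))
  else lab

def solve_alt (S : String) (pairs : List (String × String)) : Bool :=
  let label := pairs.foldl (fun lab p => lbStep lab (pvChr p.1) (pvChr p.2)) (pvInit (fun c => c))
  let cs := S.toList
  (cs.zip cs.reverse).all (fun xy => label.getD xy.1 xy.1 == label.getD xy.2 xy.2)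

-- ===== PRECONDITION & SPEC =====
-- a pair component that is a single lowercase letter (anything else: KeyError in A and B)
def pvIsL1 (s : String) : Bool :=
  match s.toList with
  | [c] => decide (c ∈ pvLetters)
  | _ => false

-- Pre_ requires every character of S and every pair component to be a single lowercase ASCII
-- letter: outside this A raises KeyError, except when the two-pointer scan meets a root
-- mismatch before any bad character, where A and B both still return False.
def Pre_solve (S : String) (pairs : List (String × String)) : Prop :=
  S.toList.all (fun c => decide (c ∈ pvLetters)) = true ∧
  pairs.all (fun p => pvIsL1 p.1 && pvIsL1 p.2) = true

instance (S : String) (pairs : List (String × String)) : Decidable (Pre_solve S pairs) := by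
  unfold Pre_solve; infer_instance

def pvWitness_solve : String × (List (String × String)) := ("abca", [("a","b"), ("a","c")])

def Spec_solve (S : String) (pairs : List (String × String)) (out : Bool) : Prop := out = solve_alt S pairs
instance (S : String) (pairs : List (String × String)) (out : Bool) : Decidable (Spec_solve S pairs out) := by unfold Spec_solve; infer_instance

-- ===== CLAIM (what is proved, stated in full; the proofs are below) =====
def Claim_equal_solve : Prop := ∀ (S : String) (pairs : List (String × String)), Dom_solve S pairs → Pre_solve S pairs → Spec_solve S pairs (solve S pairs)

-- ===== LEMMAS AND PROOFS =====

-- parent/label function of a dict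
def dfn (d : PySem.Dict Char Char) : Char → Char := fun c => d.getD c c

def Closed (f : Char → Char) : Prop := ∀ c ∈ pvLetters, f c ∈ pvLetters
def FixPt (f : Char → Char) (c : Char) : Prop := f c = c
def Reaches (f : Char → Char) (c : Char) : Prop := ∃ n, FixPt f (f^[n] c)
def UFInv (f : Char → Char) : Prop := Closed f ∧ ∀ c ∈ pvLetters, Reaches f c
def rootf (f : Char → Char) (c : Char) : Char := f^[26] c

lemma iter_mem {f : Char → Char} (hcl : Closed f) {c : Char} (hc : c ∈ pvLetters) (n : Nat) :
    f^[n] c ∈ pvLetters := by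
  induction n generalizing c with
  | zero => exact hc
  | succ n ih => rw [Function.iterate_succ_apply]; exact ih (hcl c hc)

lemma fix_iterate {f : Char → Char} {c : Char} (h : FixPt f c) (n : Nat) : f^[n] c = c :=
  Function.iterate_fixed h n

-- pigeonhole over the 26 letters: an acyclic chain stabilises within 26 steps
lemma reach_fix26 {f : Char → Char} (hcl : Closed f) {c : Char} (hc : c ∈ pvLetters)
    (h : Reaches f c) : FixPt f (f^[26] c) := by
  classical
  obtain ⟨n0, hn0⟩ := h
  have hex : ∃ n, FixPt f (f^[n] c) := ⟨n0, hn0⟩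
  set n := Nat.find hex with hn
  have hfix : FixPt f (f^[n] c) := Nat.find_spec hex
  have hmin : ∀ m < n, ¬ FixPt f (f^[m] c) := fun m hm => Nat.find_min hex hm
  have hinj : ∀ i j, i < j → j ≤ n → f^[i] c ≠ f^[j] c := by
    intro i j hij hjn heq
    have h1 : f^[(n - j) + i] c = f^[(n - j) + j] c := by
      rw [Function.iterate_add_apply, Function.iterate_add_apply, heq]
    have h2 : (n - j) + j = n := by omega
    rw [h2] at h1
    have : FixPt f (f^[(n - j) + i] c) := by rw [h1]; exact hfix
    exact hmin _ (by omega) this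
  have hnd : ((List.range (n+1)).map (fun k => f^[k] c)).Nodup := by
    refine List.Nodup.map_on ?_ (List.nodup_range)
    intro i hi j hj hfij
    by_contra hne
    rcases Nat.lt_or_ge i j with hlt | hge
    · exact hinj i j hlt (Nat.lt_succ_iff.mp (List.mem_range.mp hj)) hfij
    · have hlt : j < i := by omega
      exact hinj j i hlt (Nat.lt_succ_iff.mp (List.mem_range.mp hi)) hfij.symm
  have hsub : ((List.range (n+1)).map (fun k => f^[k] c)).toFinset ⊆ pvLetters.toFinset := by
    intro x hx
    rw [List.mem_toFinset] at hx
    obtain ⟨k, _, rfl⟩ := List.mem_map.mp hx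
    exact List.mem_toFinset.mpr (iter_mem hcl hc k)
  have hlen : n + 1 ≤ 26 := by
    have e1 : ((List.range (n+1)).map (fun k => f^[k] c)).toFinset.card = n + 1 := by
      rw [List.toFinset_card_of_nodup hnd]; simp
    have e2 := Finset.card_le_card hsub
    have e3 : pvLetters.toFinset.card ≤ 26 := by
      calc pvLetters.toFinset.card ≤ pvLetters.length := List.toFinset_card_le pvLetters
        _ = 26 := by rfl
    omega
  have h26 : f^[26] c = f^[n] c := by
    have he : 26 = (26 - n) + n := by omega
    rw [he, Function.iterate_add_apply, fix_iterate hfix]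
  show FixPt f (f^[26] c)
  rw [h26]; exact hfix

lemma root_fix {f : Char → Char} (hInv : UFInv f) {c : Char} (hc : c ∈ pvLetters) :
    FixPt f (rootf f c) := reach_fix26 hInv.1 hc (hInv.2 c hc)

lemma root_mem {f : Char → Char} (hInv : UFInv f) {c : Char} (hc : c ∈ pvLetters) :
    rootf f c ∈ pvLetters := iter_mem hInv.1 hc 26

lemma root_of_fix {f : Char → Char} {c : Char} (h : FixPt f c) : rootf f c = c :=
  fix_iterate h 26

lemma root_step {f : Char → Char} (hInv : UFInv f) {c : Char} (hc : c ∈ pvLetters) :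
    rootf f (f c) = rootf f c := by
  have h := root_fix hInv hc
  unfold rootf FixPt at *
  calc f^[26] (f c) = f^[27] c := (Function.iterate_succ_apply f 26 c).symm
    _ = f (f^[26] c) := Function.iterate_succ_apply' f 26 c
    _ = f^[26] c := h

lemma root_idem {f : Char → Char} (hInv : UFInv f) {c : Char} (hc : c ∈ pvLetters) :
    rootf f (rootf f c) = rootf f c := root_of_fix (root_fix hInv hc)

-- characterisation of the root function after a state change
lemma root_char {f g : Char → Char} (hInv : UFInv f)
    (hg : ∀ c ∈ pvLetters, g (f c) = g c)
    (hfix : ∀ v ∈ pvLetters, FixPt f v → g v = v) :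
    ∀ c ∈ pvLetters, rootf f c = g c := by
  intro c hc
  have h1 : ∀ n : Nat, g (f^[n] c) = g c := by
    intro n
    induction n with
    | zero => rfl
    | succ n ih =>
      rw [Function.iterate_succ_apply', hg _ (iter_mem hInv.1 hc n)]; exact ih
  have h2 := hfix _ (root_mem hInv hc) (root_fix hInv hc)
  calc rootf f c = g (rootf f c) := h2.symm
    _ = g c := h1 26

-- path compression step: updating u to its root preserves the invariant and all roots
lemma inv_compress {f : Char → Char} (hInv : UFInv f) {u : Char} (hu : u ∈ pvLetters) :
    UFInv (Function.update f u (rootf f u)) ∧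
      ∀ c ∈ pvLetters, rootf (Function.update f u (rootf f u)) c = rootf f c := by
  set f' := Function.update f u (rootf f u) with hf'
  have happ : ∀ c, f' c = if c = u then rootf f u else f c := fun c =>
    Function.update_apply f u (rootf f u) c
  have hcl : Closed f' := by
    intro c hc
    rw [happ]
    split
    · exact root_mem hInv hu
    · exact hInv.1 c hc
  have hfixcase : ∀ c ∈ pvLetters, FixPt f c → Reaches f' c := by
    intro c hc hfc
    refine ⟨0, ?_⟩
    show f' c = c
    by_cases hcu : c = u
    · subst hcu
      rw [happ, if_pos rfl, root_of_fix hfc]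
    · rw [happ, if_neg hcu]; exact hfc
  have hreach : ∀ (n : Nat) (c : Char), c ∈ pvLetters → FixPt f (f^[n] c) → Reaches f' c := by
    intro n
    induction n with
    | zero => intro c hc hfixc; exact hfixcase c hc hfixc
    | succ n ih =>
      intro c hc hfixc
      by_cases hfc : FixPt f c
      · exact hfixcase c hc hfc
      · by_cases hcu : c = u
        · subst hcu
          refine ⟨1, ?_⟩
          show FixPt f' (f'^[1] c)
          rw [Function.iterate_one]
          have h1 : f' c = rootf f c := by rw [happ, if_pos rfl]
          show f' (f' c) = f' c
          rw [h1, happ, if_neg (fun hh : rootf f c = c => hfc (hh ▸ root_fix hInv hc))]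
          exact root_fix hInv hc
        · have hstep : FixPt f (f^[n] (f c)) := by
            rw [← Function.iterate_succ_apply]; exact hfixc
          obtain ⟨m, hm⟩ := ih (f c) (hInv.1 c hc) hstep
          refine ⟨m + 1, ?_⟩
          have h1 : f' c = f c := by rw [happ, if_neg hcu]
          show FixPt f' (f'^[m+1] c)
          rw [Function.iterate_succ_apply, h1]
          exact hm
  have hI : UFInv f' := ⟨hcl, fun c hc => by
    obtain ⟨n, hn⟩ := hInv.2 c hc; exact hreach n c hc hn⟩
  refine ⟨hI, ?_⟩
  intro c hc
  refine root_char (g := rootf f) hI ?_ ?_ c hc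
  · intro x hx
    by_cases hxu : x = u
    · subst hxu
      rw [happ, if_pos rfl, root_idem hInv hu]
    · rw [happ, if_neg hxu, root_step hInv hx]
  · intro v hv hfixv
    have hv' : f' v = v := hfixv
    rw [happ] at hv'
    by_cases hvu : v = u
    · rw [if_pos hvu] at hv'
      subst hvu
      rw [hv']
    · rw [if_neg hvu] at hv'
      exact root_of_fix hv'

-- union step: linking root b under root a
lemma inv_link {f : Char → Char} (hInv : UFInv f) {a b : Char}
    (ha : a ∈ pvLetters) (hb : b ∈ pvLetters) (hfa : FixPt f a) (hfb : FixPt f b)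
    (hne : b ≠ a) :
    UFInv (Function.update f b a) ∧
      ∀ c ∈ pvLetters, rootf (Function.update f b a) c = (if rootf f c = b then a else rootf f c) := by
  set f' := Function.update f b a with hf'
  have happ : ∀ c, f' c = if c = b then a else f c := fun c => Function.update_apply f b a c
  have hcl : Closed f' := by
    intro c hc
    rw [happ]
    split
    · exact ha
    · exact hInv.1 c hc
  have hfa' : FixPt f' a := by
    show f' a = a
    rw [happ, if_neg (fun h => hne h.symm)]
    exact hfa
  have hfixcase : ∀ c ∈ pvLetters, FixPt f c → Reaches f' c := by
    intro c hc hfc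
    by_cases hcb : c = b
    · refine ⟨1, ?_⟩
      show FixPt f' (f'^[1] c)
      rw [Function.iterate_one]
      have h1 : f' c = a := by rw [happ, if_pos hcb]
      show f' (f' c) = f' c
      rw [h1]
      exact hfa'
    · exact ⟨0, by show f' c = c; rw [happ, if_neg hcb]; exact hfc⟩
  have hreach : ∀ (n : Nat) (c : Char), c ∈ pvLetters → FixPt f (f^[n] c) → Reaches f' c := by
    intro n
    induction n with
    | zero => intro c hc h0; exact hfixcase c hc h0
    | succ n ih =>
      intro c hc hfixc
      by_cases hfc : FixPt f c
      · exact hfixcase c hc hfc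
      · have hcb : c ≠ b := fun h => hfc (h ▸ hfb)
        have hstep : FixPt f (f^[n] (f c)) := by
          rw [← Function.iterate_succ_apply]; exact hfixc
        obtain ⟨m, hm⟩ := ih (f c) (hInv.1 c hc) hstep
        refine ⟨m + 1, ?_⟩
        have h1 : f' c = f c := by rw [happ, if_neg hcb]
        show FixPt f' (f'^[m+1] c)
        rw [Function.iterate_succ_apply, h1]
        exact hm
  have hI : UFInv f' := ⟨hcl, fun c hc => by
    obtain ⟨n, hn⟩ := hInv.2 c hc; exact hreach n c hc hn⟩
  refine ⟨hI, ?_⟩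
  intro c hc
  refine root_char (g := fun c => if rootf f c = b then a else rootf f c) hI ?_ ?_ c hc
  · intro x hx
    beta_reduce
    by_cases hxb : x = b
    · have hxa : f' x = a := by rw [happ, if_pos hxb]
      rw [hxa]
      have hra : rootf f a = a := root_of_fix hfa
      have hrb : rootf f b = b := root_of_fix hfb
      rw [hxb, hra, hrb, if_pos rfl, if_neg (fun h : a = b => hne h.symm)]
    · have hxf : f' x = f x := by rw [happ, if_neg hxb]
      rw [hxf, root_step hInv hx]
  · intro v hv hfixv
    beta_reduce
    have hv' : f' v = v := hfixv
    rw [happ] at hv'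
    by_cases hvb : v = b
    · rw [if_pos hvb] at hv'
      exact absurd (hvb ▸ hv' : a = b).symm hne
    · rw [if_neg hvb] at hv'
      rw [root_of_fix hv', if_neg hvb]

-- dict-level bridge
lemma dfn_insert (d : PySem.Dict Char Char) (k v : Char) :
    dfn (d.insert k v) = Function.update (dfn d) k v := by
  funext x
  rw [Function.update_apply]
  show (d.insert k v).getD x x = _
  rw [PySem.Dict.getD_insert]
  rfl

lemma ufFind_spec : ∀ (n fuel : Nat) (d : PySem.Dict Char Char) (c : Char), n < fuel →
    c ∈ pvLetters → UFInv (dfn d) → FixPt (dfn d) ((dfn d)^[n] c) →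
    (ufFind fuel d c).1 = rootf (dfn d) c ∧ UFInv (dfn (ufFind fuel d c).2) ∧
      ∀ x ∈ pvLetters, rootf (dfn (ufFind fuel d c).2) x = rootf (dfn d) x := by
  intro n
  induction n with
  | zero =>
    intro fuel d c hlt hc hInv hfix
    obtain ⟨m, rfl⟩ : ∃ m, fuel = m + 1 := ⟨fuel - 1, by omega⟩
    have hp : d.getD c c = c := hfix
    have hred : ufFind (m + 1) d c = (c, d) := by
      simp only [ufFind]
      rw [if_pos hp]
    rw [hred]
    exact ⟨(root_of_fix hfix).symm, hInv, fun x hx => rfl⟩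
  | succ n ih =>
    intro fuel d c hlt hc hInv hfix
    obtain ⟨m, rfl⟩ : ∃ m, fuel = m + 1 := ⟨fuel - 1, by omega⟩
    by_cases hpc : d.getD c c = c
    · have hfc : FixPt (dfn d) c := hpc
      have hred : ufFind (m + 1) d c = (c, d) := by
        simp only [ufFind]
        rw [if_pos hpc]
      rw [hred]
      exact ⟨(root_of_fix hfc).symm, hInv, fun x hx => rfl⟩
    · have hred : ufFind (m + 1) d c =
          ((ufFind m d (dfn d c)).1, (ufFind m d (dfn d c)).2.insert c (ufFind m d (dfn d c)).1) := by
        simp only [ufFind]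
        rw [if_neg hpc]
        rfl
      rw [hred]
      have hpmem : dfn d c ∈ pvLetters := hInv.1 c hc
      have hfix' : FixPt (dfn d) ((dfn d)^[n] (dfn d c)) := by
        rw [← Function.iterate_succ_apply]; exact hfix
      obtain ⟨h1, h2, h3⟩ := ih m d (dfn d c) (by omega) hpmem hInv hfix'
      have hr : (ufFind m d (dfn d c)).1 = rootf (dfn d) c := by
        rw [h1, root_step hInv hc]
      have hrr : (ufFind m d (dfn d c)).1 = rootf (dfn (ufFind m d (dfn d c)).2) c := by
        rw [hr, ← h3 c hc]
      obtain ⟨hI, hR⟩ := inv_compress h2 hc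
      refine ⟨hr, ?_, ?_⟩
      · rw [dfn_insert, hrr]; exact hI
      · intro x hx
        rw [dfn_insert, hrr, hR x hx, h3 x hx]

lemma ufFind_full (d : PySem.Dict Char Char) (c : Char) (hc : c ∈ pvLetters)
    (hInv : UFInv (dfn d)) :
    (ufFind 27 d c).1 = rootf (dfn d) c ∧ UFInv (dfn (ufFind 27 d c).2) ∧
      ∀ x ∈ pvLetters, rootf (dfn (ufFind 27 d c).2) x = rootf (dfn d) x :=
  ufFind_spec 26 27 d c (by omega) hc hInv (reach_fix26 hInv.1 hc (hInv.2 c hc))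

-- pure equality logic of a two-class merge
lemma merge_iff (k m rx ry : Char) (hkm : k ≠ m) :
    ((if rx = m then k else rx) = (if ry = m then k else ry)) ↔
      (rx = ry ∨ (rx = k ∧ ry = m) ∨ (rx = m ∧ ry = k)) := by
  by_cases h1 : rx = m <;> by_cases h2 : ry = m <;> simp [h1, h2] <;> tauto

-- the merged-partition relation
def MRel (f : Char → Char) (a b x y : Char) : Prop :=
  rootf f x = rootf f y ∨ (rootf f x = rootf f a ∧ rootf f y = rootf f b) ∨
    (rootf f x = rootf f b ∧ rootf f y = rootf f a)

lemma ufUnion_spec (d : PySem.Dict Char Char) (sz : PySem.Dict Char Int) {a b : Char}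
    (ha : a ∈ pvLetters) (hb : b ∈ pvLetters) (hInv : UFInv (dfn d)) :
    UFInv (dfn (ufUnion (d, sz) a b).1) ∧
      ∀ x ∈ pvLetters, ∀ y ∈ pvLetters,
        (rootf (dfn (ufUnion (d, sz) a b).1) x = rootf (dfn (ufUnion (d, sz) a b).1) y ↔
          MRel (dfn d) a b x y) := by
  obtain ⟨ha1, ha2, ha3⟩ := ufFind_full d a ha hInv
  obtain ⟨hb1, hb2, hb3⟩ := ufFind_full (ufFind 27 d a).2 b hb ha2
  have hufu : ufUnion (d, sz) a b =
      (if (ufFind 27 d a).1 ≠ (ufFind 27 (ufFind 27 d a).2 b).1 then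
        ((ufFind 27 (ufFind 27 d a).2 b).2.insert
            (if sz.getD (ufFind 27 d a).1 1 < sz.getD (ufFind 27 (ufFind 27 d a).2 b).1 1 then
              ((ufFind 27 (ufFind 27 d a).2 b).1, (ufFind 27 d a).1)
            else ((ufFind 27 d a).1, (ufFind 27 (ufFind 27 d a).2 b).1)).2
            (if sz.getD (ufFind 27 d a).1 1 < sz.getD (ufFind 27 (ufFind 27 d a).2 b).1 1 then
              ((ufFind 27 (ufFind 27 d a).2 b).1, (ufFind 27 d a).1)
            else ((ufFind 27 d a).1, (ufFind 27 (ufFind 27 d a).2 b).1)).1,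
          sz.insert
            (if sz.getD (ufFind 27 d a).1 1 < sz.getD (ufFind 27 (ufFind 27 d a).2 b).1 1 then
              ((ufFind 27 (ufFind 27 d a).2 b).1, (ufFind 27 d a).1)
            else ((ufFind 27 d a).1, (ufFind 27 (ufFind 27 d a).2 b).1)).1
            (sz.getD
              (if sz.getD (ufFind 27 d a).1 1 < sz.getD (ufFind 27 (ufFind 27 d a).2 b).1 1 then
                ((ufFind 27 (ufFind 27 d a).2 b).1, (ufFind 27 d a).1)
              else ((ufFind 27 d a).1, (ufFind 27 (ufFind 27 d a).2 b).1)).1 1 +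
              sz.getD
              (if sz.getD (ufFind 27 d a).1 1 < sz.getD (ufFind 27 (ufFind 27 d a).2 b).1 1 then
                ((ufFind 27 (ufFind 27 d a).2 b).1, (ufFind 27 d a).1)
              else ((ufFind 27 d a).1, (ufFind 27 (ufFind 27 d a).2 b).1)).2 1))
      else ((ufFind 27 (ufFind 27 d a).2 b).2, sz)) := rfl
  rw [hufu]
  set fa := ufFind 27 d a with hfa
  set fb := ufFind 27 fa.2 b with hfb
  have hra : fa.1 = rootf (dfn d) a := ha1
  have hrb : fb.1 = rootf (dfn d) b := by rw [hb1, ha3 b hb]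
  have hroots2 : ∀ x ∈ pvLetters, rootf (dfn fb.2) x = rootf (dfn d) x := by
    intro x hx; rw [hb3 x hx, ha3 x hx]
  have hmain : ∀ (k m : Char), k ∈ pvLetters → m ∈ pvLetters →
      FixPt (dfn fb.2) k → FixPt (dfn fb.2) m → m ≠ k →
      ((rootf (dfn d) k = rootf (dfn d) a ∧ rootf (dfn d) m = rootf (dfn d) b) ∨
        (rootf (dfn d) k = rootf (dfn d) b ∧ rootf (dfn d) m = rootf (dfn d) a)) →
      UFInv (dfn (fb.2.insert m k)) ∧
        ∀ x ∈ pvLetters, ∀ y ∈ pvLetters,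
          (rootf (dfn (fb.2.insert m k)) x = rootf (dfn (fb.2.insert m k)) y ↔
            MRel (dfn d) a b x y) := by
    intro k m hk hm hfk hfm hmk hor
    obtain ⟨hI, hR⟩ := inv_link hb2 hk hm hfk hfm hmk
    rw [dfn_insert]
    refine ⟨hI, ?_⟩
    intro x hx y hy
    rw [hR x hx, hR y hy]
    have hrk : rootf (dfn fb.2) k = k := root_of_fix hfk
    have hrm : rootf (dfn fb.2) m = m := root_of_fix hfm
    have hKM : k ≠ m := fun h => hmk h.symm
    rw [merge_iff k m _ _ hKM]
    unfold MRel
    rw [hroots2 x hx, hroots2 y hy]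
    rcases hor with ⟨hk1, hm1⟩ | ⟨hk1, hm1⟩
    · rw [← hroots2 k hk, hrk] at hk1
      rw [← hroots2 m hm, hrm] at hm1
      rw [hk1, hm1]
    · rw [← hroots2 k hk, hrk] at hk1
      rw [← hroots2 m hm, hrm] at hm1
      rw [hk1, hm1]
      exact or_congr Iff.rfl or_comm
  have hfk1 : FixPt (dfn fb.2) fa.1 := by
    have h : rootf (dfn fb.2) a = fa.1 := by rw [hroots2 a ha, hra]
    rw [← h]; exact root_fix hb2 ha
  have hfk2 : FixPt (dfn fb.2) fb.1 := by
    have h : rootf (dfn fb.2) b = fb.1 := by rw [hroots2 b hb, hrb]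
    rw [← h]; exact root_fix hb2 hb
  have hm1 : fa.1 ∈ pvLetters := by rw [hra]; exact root_mem hInv ha
  have hm2 : fb.1 ∈ pvLetters := by rw [hrb]; exact root_mem hInv hb
  have hia : rootf (dfn d) fa.1 = rootf (dfn d) a := by rw [hra]; exact root_idem hInv ha
  have hib : rootf (dfn d) fb.1 = rootf (dfn d) b := by rw [hrb]; exact root_idem hInv hb
  by_cases hne : fa.1 = fb.1
  · rw [if_neg (fun h => h hne)]
    refine ⟨hb2, ?_⟩
    intro x hx y hy
    rw [hroots2 x hx, hroots2 y hy]
    unfold MRel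
    have hab : rootf (dfn d) a = rootf (dfn d) b := by rw [← hra, ← hrb, hne]
    constructor
    · intro h; exact Or.inl h
    · rintro (h | ⟨h1, h2⟩ | ⟨h1, h2⟩)
      · exact h
      · rw [h1, h2, hab]
      · rw [h1, h2, hab]
  · rw [if_pos hne]
    by_cases hsz : sz.getD fa.1 1 < sz.getD fb.1 1
    · rw [if_pos hsz]
      exact hmain fb.1 fa.1 hm2 hm1 hfk2 hfk1 hne (Or.inr ⟨hib, hia⟩)
    · rw [if_neg hsz]
      exact hmain fa.1 fb.1 hm1 hm2 hfk1 hfk2 (fun h => hne h.symm) (Or.inl ⟨hia, hib⟩)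

-- ----- B side -----
lemma get?_mk_map (g : Char → Char) : ∀ (l : List (Char × Char)) (x : Char),
    (PySem.Dict.mk (l.map (fun kv => (kv.1, g kv.2)))).get? x = ((PySem.Dict.mk l).get? x).map g := by
  intro l
  induction l with
  | nil => intro x; rfl
  | cons kv t ih =>
    intro x
    obtain ⟨k, v⟩ := kv
    simp only [List.map_cons]
    rw [PySem.Dict.get?_mk_cons, PySem.Dict.get?_mk_cons]
    by_cases h : (k == x) = true
    · rw [if_pos h, if_pos h]; rfl
    · rw [if_neg h, if_neg h]; exact ih x

def LKeys (lab : PySem.Dict Char Char) : Prop := ∀ x ∈ pvLetters, (lab.get? x).isSome = true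

def LinkInv (f : Char → Char) (lab : PySem.Dict Char Char) : Prop :=
  ∀ x ∈ pvLetters, ∀ y ∈ pvLetters, (rootf f x = rootf f y ↔ dfn lab x = dfn lab y)

lemma pvChr_mem {st : String} (h : pvIsL1 st = true) : pvChr st ∈ pvLetters := by
  unfold pvIsL1 at h
  unfold pvChr
  cases hl : st.toList with
  | nil => rw [hl] at h; simp at h
  | cons c t =>
    rw [hl] at h
    cases t with
    | nil =>
      simp only [decide_eq_true_eq] at h
      simpa using h
    | cons c2 t2 => simp at h

lemma lbStep_spec (lab : PySem.Dict Char Char) {a b : Char}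
    (ha : a ∈ pvLetters) (hb : b ∈ pvLetters) (hK : LKeys lab) :
    LKeys (lbStep lab a b) ∧
      ∀ x ∈ pvLetters, dfn (lbStep lab a b) x =
        (if dfn lab a ≠ dfn lab b ∧ dfn lab x = dfn lab b then dfn lab a else dfn lab x) := by
  by_cases hne : lab.getD a a ≠ lab.getD b b
  · have hstep : lbStep lab a b =
        PySem.Dict.mk (lab.items.map (fun kv => (kv.1, if kv.2 = lab.getD b b then lab.getD a a else kv.2))) := by
      simp only [lbStep]
      rw [if_pos hne]
    have hget : ∀ x, (lbStep lab a b).get? x =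
        (lab.get? x).map (fun v => if v = lab.getD b b then lab.getD a a else v) := by
      intro x
      rw [hstep]
      exact get?_mk_map (fun v => if v = lab.getD b b then lab.getD a a else v) lab.items x
    constructor
    · intro x hx
      rw [hget x]
      have hs := hK x hx
      cases hg : lab.get? x with
      | none => rw [hg] at hs; simp at hs
      | some v => simp
    · intro x hx
      obtain ⟨v, hv⟩ := Option.isSome_iff_exists.mp (hK x hx)
      have hdx : dfn lab x = v := by
        show lab.getD x x = v
        rw [PySem.Dict.getD_eq_get?_getD, hv]; rfl
      have hdm : dfn (lbStep lab a b) x = if v = lab.getD b b then lab.getD a a else v := by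
        show (lbStep lab a b).getD x x = _
        rw [PySem.Dict.getD_eq_get?_getD, hget x, hv]; rfl
      rw [hdm, hdx]
      by_cases hvb : v = lab.getD b b
      · rw [if_pos hvb, if_pos ⟨hne, hvb⟩]
        rfl
      · rw [if_neg hvb, if_neg (fun h => hvb h.2)]
  · have hstep : lbStep lab a b = lab := by
      simp only [lbStep]
      rw [if_neg hne]
    rw [hstep]
    refine ⟨hK, ?_⟩
    intro x hx
    rw [if_neg (fun h => hne h.1)]

-- one pair preserves the coupling invariant
lemma step_link (d : PySem.Dict Char Char) (sz : PySem.Dict Char Int)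
    (lab : PySem.Dict Char Char) {a b : Char}
    (ha : a ∈ pvLetters) (hb : b ∈ pvLetters)
    (hInv : UFInv (dfn d)) (hK : LKeys lab) (hL : LinkInv (dfn d) lab) :
    UFInv (dfn (ufUnion (d, sz) a b).1) ∧ LKeys (lbStep lab a b) ∧
      LinkInv (dfn (ufUnion (d, sz) a b).1) (lbStep lab a b) := by
  obtain ⟨hU1, hU2⟩ := ufUnion_spec d sz ha hb hInv
  obtain ⟨hB1, hB2⟩ := lbStep_spec lab ha hb hK
  refine ⟨hU1, hB1, ?_⟩
  intro x hx y hy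
  rw [hU2 x hx y hy, hB2 x hx, hB2 y hy]
  by_cases hne : dfn lab a ≠ dfn lab b
  · have hsimp : ∀ z : Char, (if dfn lab a ≠ dfn lab b ∧ z = dfn lab b then dfn lab a else z)
        = (if z = dfn lab b then dfn lab a else z) := by
      intro z
      by_cases h : z = dfn lab b
      · rw [if_pos ⟨hne, h⟩, if_pos h]
      · rw [if_neg (fun hh => h hh.2), if_neg h]
    rw [hsimp, hsimp, merge_iff _ _ _ _ hne]
    unfold MRel
    rw [hL x hx y hy, hL x hx a ha, hL y hy b hb, hL x hx b hb, hL y hy a ha]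
  · have hne' : dfn lab a = dfn lab b := not_ne_iff.mp hne
    have hzero : ∀ z : Char, (if dfn lab a ≠ dfn lab b ∧ z = dfn lab b then dfn lab a else z) = z :=
      fun z => if_neg (fun h => h.1 hne')
    rw [hzero, hzero]
    have hab : rootf (dfn d) a = rootf (dfn d) b := (hL a ha b hb).mpr hne'
    unfold MRel
    constructor
    · rintro (h | ⟨h1, h2⟩ | ⟨h1, h2⟩)
      · exact (hL x hx y hy).mp h
      · exact (hL x hx y hy).mp (by rw [h1, h2, hab])
      · exact (hL x hx y hy).mp (by rw [h1, h2, hab])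
    · intro h
      exact Or.inl ((hL x hx y hy).mpr h)

lemma fold_link : ∀ (ps : List (String × String)) (st : PySem.Dict Char Char × PySem.Dict Char Int)
    (lab : PySem.Dict Char Char),
    ps.all (fun p => pvIsL1 p.1 && pvIsL1 p.2) = true →
    UFInv (dfn st.1) → LKeys lab → LinkInv (dfn st.1) lab →
    UFInv (dfn (ps.foldl (fun st p => ufUnion st (pvChr p.1) (pvChr p.2)) st).1) ∧
    LKeys (ps.foldl (fun lab p => lbStep lab (pvChr p.1) (pvChr p.2)) lab) ∧
    LinkInv (dfn (ps.foldl (fun st p => ufUnion st (pvChr p.1) (pvChr p.2)) st).1)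
      (ps.foldl (fun lab p => lbStep lab (pvChr p.1) (pvChr p.2)) lab) := by
  intro ps
  induction ps with
  | nil => intro st lab _ h1 h2 h3; exact ⟨h1, h2, h3⟩
  | cons p t ih =>
    intro st lab hall h1 h2 h3
    rw [List.all_cons, Bool.and_eq_true] at hall
    obtain ⟨hp, ht⟩ := hall
    rw [Bool.and_eq_true] at hp
    have ha : pvChr p.1 ∈ pvLetters := pvChr_mem hp.1
    have hb : pvChr p.2 ∈ pvLetters := pvChr_mem hp.2
    obtain ⟨d, sz⟩ := st
    obtain ⟨g1, g2, g3⟩ := step_link d sz lab ha hb h1 h2 h3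
    simp only [List.foldl_cons]
    exact ih (ufUnion (d, sz) (pvChr p.1) (pvChr p.2)) (lbStep lab (pvChr p.1) (pvChr p.2)) ht g1 g2 g3

-- ----- initial table -----
lemma foldl_insert_getD (l : List Char) : ∀ (d : PySem.Dict Char Char) (x : Char),
    (l.foldl (fun d c => d.insert c c) d).getD x x = if x ∈ l then x else d.getD x x := by
  induction l with
  | nil => intro d x; simp
  | cons c t ih =>
    intro d x
    rw [List.foldl_cons, ih]
    by_cases hx : x ∈ t
    · rw [if_pos hx, if_pos (List.mem_cons_of_mem c hx)]
    · rw [if_neg hx, PySem.Dict.getD_insert]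
      by_cases hxc : x = c
      · subst hxc
        rw [if_pos rfl, if_pos (by simp)]
      · rw [if_neg hxc, if_neg (fun hmem => (List.mem_cons.mp hmem).elim hxc hx)]

lemma foldl_insert_isSome_mono (l : List Char) : ∀ (d : PySem.Dict Char Char) (x : Char),
    (d.get? x).isSome = true → ((l.foldl (fun d c => d.insert c c) d).get? x).isSome = true := by
  induction l with
  | nil => intro d x h; exact h
  | cons c t ih =>
    intro d x h
    rw [List.foldl_cons]
    refine ih _ _ ?_
    rw [PySem.Dict.get?_insert]
    split
    · rfl
    · exact h

lemma foldl_insert_isSome (l : List Char) : ∀ (d : PySem.Dict Char Char) (x : Char), x ∈ l →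
    ((l.foldl (fun d c => d.insert c c) d).get? x).isSome = true := by
  induction l with
  | nil => intro d x h; simp at h
  | cons c t ih =>
    intro d x h
    rw [List.foldl_cons]
    rcases List.mem_cons.mp h with h | h
    · subst h
      refine foldl_insert_isSome_mono t _ _ ?_
      rw [PySem.Dict.get?_insert_self]
      rfl
    · exact ih _ _ h

lemma pvInit_getD (x : Char) : (pvInit (fun c => c)).getD x x = x := by
  show (pvLetters.foldl (fun d c => d.insert c c) PySem.Dict.empty).getD x x = x
  rw [foldl_insert_getD]
  split
  · rfl
  · rw [PySem.Dict.getD_empty]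

lemma pvInit_keys : LKeys (pvInit (fun c => c)) := by
  intro x hx
  show ((pvLetters.foldl (fun d c => d.insert c c) PySem.Dict.empty).get? x).isSome = true
  exact foldl_insert_isSome pvLetters _ _ hx

-- ----- final loops -----
lemma ufCheck_iff (cs : List Char) (r : Char → Char) (hcs : ∀ c ∈ cs, c ∈ pvLetters) :
    ∀ (fuel k : Nat) (d : PySem.Dict Char Char), UFInv (dfn d) →
    (∀ x ∈ pvLetters, rootf (dfn d) x = r x) → cs.length ≤ fuel + 2 * k →
    (ufCheck fuel d cs (k : Int) ((cs.length : Int) - 1 - k) = true ↔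
      ∀ i j : Nat, k ≤ i → i ≤ j → i + j + 1 = cs.length →
        r (cs.getD i 'a') = r (cs.getD j 'a')) := by
  intro fuel
  induction fuel with
  | zero =>
    intro k d hI hr hle
    simp only [ufCheck]
    constructor
    · intro _ i j h1 h2 h3
      exact absurd h3 (by omega)
    · intro _; trivial
  | succ fuel ih =>
    intro k d hI hr hle
    by_cases hcond : (k : Int) ≤ (cs.length : Int) - 1 - k
    · have hk : k < cs.length := by omega
      have hj : cs.length - 1 - k < cs.length := by omega
      have hjk : k ≤ cs.length - 1 - k := by omega
      have hci : PySem.List.pyGetD cs (k : Int) 'a' = cs.getD k 'a' :=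
        PySem.List.pyGetD_natCast cs k 'a'
      have hjcast : ((cs.length : Int) - 1 - k) = ((cs.length - 1 - k : Nat) : Int) := by omega
      have hcj : PySem.List.pyGetD cs ((cs.length : Int) - 1 - k) 'a' = cs.getD (cs.length - 1 - k) 'a' := by
        rw [hjcast]; exact PySem.List.pyGetD_natCast cs _ 'a'
      have hmemi : cs.getD k 'a' ∈ pvLetters := by
        rw [List.getD_eq_getElem cs 'a' hk]; exact hcs _ (List.getElem_mem hk)
      have hmemj : cs.getD (cs.length - 1 - k) 'a' ∈ pvLetters := by
        rw [List.getD_eq_getElem cs 'a' hj]; exact hcs _ (List.getElem_mem hj)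
      obtain ⟨f1, f2, f3⟩ := ufFind_full d (cs.getD k 'a') hmemi hI
      obtain ⟨g1, g2, g3⟩ := ufFind_full (ufFind 27 d (cs.getD k 'a')).2
        (cs.getD (cs.length - 1 - k) 'a') hmemj f2
      have hfi : (ufFind 27 d (cs.getD k 'a')).1 = r (cs.getD k 'a') := by
        rw [f1, hr _ hmemi]
      have hfj : (ufFind 27 (ufFind 27 d (cs.getD k 'a')).2 (cs.getD (cs.length - 1 - k) 'a')).1
          = r (cs.getD (cs.length - 1 - k) 'a') := by
        rw [g1, f3 _ hmemj, hr _ hmemj]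
      have hred : ufCheck (fuel + 1) d cs (k : Int) ((cs.length : Int) - 1 - k) =
          (if (ufFind 27 d (cs.getD k 'a')).1 ≠
              (ufFind 27 (ufFind 27 d (cs.getD k 'a')).2 (cs.getD (cs.length - 1 - k) 'a')).1 then false
           else ufCheck fuel (ufFind 27 (ufFind 27 d (cs.getD k 'a')).2 (cs.getD (cs.length - 1 - k) 'a')).2
              cs ((k : Int) + 1) ((cs.length : Int) - 1 - k - 1)) := by
        simp only [ufCheck]
        rw [if_pos hcond, hci, hcj]
      rw [hred]
      by_cases heq : r (cs.getD k 'a') = r (cs.getD (cs.length - 1 - k) 'a')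
      · have hne : ¬ ((ufFind 27 d (cs.getD k 'a')).1 ≠
            (ufFind 27 (ufFind 27 d (cs.getD k 'a')).2 (cs.getD (cs.length - 1 - k) 'a')).1) := by
          rw [hfi, hfj]; exact fun h => h heq
        rw [if_neg hne]
        have hcast1 : (k : Int) + 1 = ((k + 1 : Nat) : Int) := by omega
        have hcast2 : (cs.length : Int) - 1 - (k : Int) - 1 = (cs.length : Int) - 1 - ((k + 1 : Nat) : Int) := by
          omega
        rw [hcast1, hcast2]
        have hroots : ∀ x ∈ pvLetters,
            rootf (dfn (ufFind 27 (ufFind 27 d (cs.getD k 'a')).2 (cs.getD (cs.length - 1 - k) 'a')).2) x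
              = r x := by
          intro x hx
          rw [g3 x hx, f3 x hx, hr x hx]
        rw [ih (k + 1) _ g2 hroots (by omega)]
        constructor
        · intro h i j h1 h2 h3
          rcases Nat.eq_or_lt_of_le h1 with he | hlt
          · have hje : j = cs.length - 1 - k := by omega
            rw [← he, hje]
            exact heq
          · exact h i j (by omega) h2 h3
        · intro h i j h1 h2 h3
          exact h i j (by omega) h2 h3
      · have hne : (ufFind 27 d (cs.getD k 'a')).1 ≠
            (ufFind 27 (ufFind 27 d (cs.getD k 'a')).2 (cs.getD (cs.length - 1 - k) 'a')).1 := by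
          rw [hfi, hfj]; exact heq
        rw [if_pos hne]
        constructor
        · intro h
          exact absurd h (by simp)
        · intro h
          exact absurd (h k (cs.length - 1 - k) (le_refl k) hjk (by omega)) heq
    · have hred : ufCheck (fuel + 1) d cs (k : Int) ((cs.length : Int) - 1 - k) = true := by
        simp only [ufCheck]
        rw [if_neg hcond]
      rw [hred]
      constructor
      · intro _ i j h1 h2 h3
        exact absurd h3 (by omega)
      · intro _; trivial

lemma getElem_idx_congr (l : List Char) {i j : Nat} (hij : i = j) (hi : i < l.length) :
    l[i]'hi = l[j]'(hij ▸ hi) := by subst hij; rfl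

lemma zip_all_iff (lab : PySem.Dict Char Char) (cs : List Char) :
    ((cs.zip cs.reverse).all (fun xy => lab.getD xy.1 xy.1 == lab.getD xy.2 xy.2) = true ↔
      ∀ i j : Nat, i ≤ j → i + j + 1 = cs.length →
        dfn lab (cs.getD i 'a') = dfn lab (cs.getD j 'a')) := by
  have hlen : (cs.zip cs.reverse).length = cs.length := by
    rw [List.length_zip, List.length_reverse, Nat.min_self]
  rw [List.all_eq_true]
  constructor
  · intro h i j hij hsum
    have hi : i < cs.length := by omega
    have hj : j < cs.length := by omega
    have hg : (cs.zip cs.reverse)[i]'(by omega) =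
        (cs[i], cs.reverse[i]'(by rw [List.length_reverse]; omega)) := List.getElem_zip
    have hmem : (cs[i], cs.reverse[i]'(by rw [List.length_reverse]; omega)) ∈ cs.zip cs.reverse := by
      rw [← hg]
      exact List.getElem_mem (by omega)
    have hb := h _ hmem
    rw [beq_iff_eq] at hb
    have hrev : cs.reverse[i]'(by rw [List.length_reverse]; omega) = cs[cs.length - 1 - i]'(by omega) :=
      List.getElem_reverse _
    have hidx : cs[cs.length - 1 - i]'(by omega) = cs[j]'hj :=
      getElem_idx_congr cs (by omega) (by omega)
    rw [hrev, hidx] at hb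
    show dfn lab (cs.getD i 'a') = dfn lab (cs.getD j 'a')
    rw [List.getD_eq_getElem cs 'a' hi, List.getD_eq_getElem cs 'a' hj]
    exact hb
  · intro h xy hxy
    obtain ⟨i, hilen, hEq⟩ := List.mem_iff_getElem.mp hxy
    have hi : i < cs.length := by omega
    have hg : (cs.zip cs.reverse)[i]'(by omega) =
        (cs[i], cs.reverse[i]'(by rw [List.length_reverse]; omega)) := List.getElem_zip
    have hrev : cs.reverse[i]'(by rw [List.length_reverse]; omega) = cs[cs.length - 1 - i]'(by omega) :=
      List.getElem_reverse _
    have hmain : dfn lab (cs[i]'hi) = dfn lab (cs[cs.length - 1 - i]'(by omega)) := by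
      rcases Nat.lt_or_ge (cs.length - 1 - i) i with hlt | hle
      · have hh := h (cs.length - 1 - i) i (by omega) (by omega)
        rw [List.getD_eq_getElem cs 'a' (by omega : cs.length - 1 - i < cs.length),
          List.getD_eq_getElem cs 'a' hi] at hh
        exact hh.symm
      · have hh := h i (cs.length - 1 - i) hle (by omega)
        rwa [List.getD_eq_getElem cs 'a' hi,
          List.getD_eq_getElem cs 'a' (by omega : cs.length - 1 - i < cs.length)] at hh
    rw [← hEq, hg, hrev]
    exact beq_iff_eq.mpr hmain

-- ===== VERDICT (by name: the statement is the Claim_ definition above) =====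
theorem solve_spec : Claim_equal_solve := by
  intro S pairs hDom hPre
  unfold Spec_solve
  obtain ⟨hS, hP⟩ := hPre
  have hcs : ∀ c ∈ S.toList, c ∈ pvLetters := by
    intro c hc
    have hh := List.all_eq_true.mp hS c hc
    simpa using hh
  have hfix0 : ∀ z, dfn (pvInit (fun c => c)) z = z := pvInit_getD
  have hI0 : UFInv (dfn (pvInit (fun c => c))) := by
    constructor
    · intro c hc
      rw [hfix0 c]; exact hc
    · intro c hc
      exact ⟨0, hfix0 c⟩
  have hroot0 : ∀ z, rootf (dfn (pvInit (fun c => c))) z = z := fun z =>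
    fix_iterate (hfix0 z) 26
  have hL0 : LinkInv (dfn (pvInit (fun c => c))) (pvInit (fun c => c)) := by
    intro x hx y hy
    rw [hroot0 x, hroot0 y]
    show x = y ↔ dfn _ x = dfn _ y
    rw [hfix0 x, hfix0 y]
  obtain ⟨hI, hK, hL⟩ := fold_link pairs
    (pvInit (fun c => c), pvLetters.foldl (fun d c => d.insert c 1) PySem.Dict.empty)
    (pvInit (fun c => c)) hP hI0 pvInit_keys hL0
  show solve S pairs = solve_alt S pairs
  unfold solve solve_alt
  set stA := pairs.foldl (fun st p => ufUnion st (pvChr p.1) (pvChr p.2))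
    (pvInit (fun c => c), pvLetters.foldl (fun d c => d.insert c 1) PySem.Dict.empty) with hstA
  set lab := pairs.foldl (fun lab p => lbStep lab (pvChr p.1) (pvChr p.2)) (pvInit (fun c => c)) with hlab
  rw [Bool.eq_iff_iff]
  have h1 := ufCheck_iff S.toList (fun c => rootf (dfn stA.1) c) hcs (S.toList.length + 1) 0 stA.1 hI
    (fun x hx => rfl) (by omega)
  simp only [Nat.cast_zero, sub_zero] at h1
  rw [h1, zip_all_iff lab S.toList]
  constructor
  · intro h i j hij hsum
    have hi : i < S.toList.length := by omega
    have hj : j < S.toList.length := by omega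
    have hmi : S.toList.getD i 'a' ∈ pvLetters := by
      rw [List.getD_eq_getElem _ 'a' hi]; exact hcs _ (List.getElem_mem hi)
    have hmj : S.toList.getD j 'a' ∈ pvLetters := by
      rw [List.getD_eq_getElem _ 'a' hj]; exact hcs _ (List.getElem_mem hj)
    exact (hL _ hmi _ hmj).mp (h i j (Nat.zero_le i) hij hsum)
  · intro h i j _ hij hsum
    have hi : i < S.toList.length := by omega
    have hj : j < S.toList.length := by omega
    have hmi : S.toList.getD i 'a' ∈ pvLetters := by
      rw [List.getD_eq_getElem _ 'a' hi]; exact hcs _ (List.getElem_mem hi)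
    have hmj : S.toList.getD j 'a' ∈ pvLetters := by
      rw [List.getD_eq_getElem _ 'a' hj]; exact hcs _ (List.getElem_mem hj)
    exact (hL _ hmi _ hmj).mpr (h i j hij hsum)
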